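-- pv_equiv track=rewrite | github.com/DimitrisMitroulis/NN-Projects | Kalliopi-CIT/CIT.py | EtToRank
-- ===== SOURCE A (Python) =====
-- def EtToRank(temp):
--     temperature_ranges = {
--         (39, float('inf')): 0,
--         (37, 39): 2,
--         (35, 37): 4,
--         (33, 35): 5,
--         (31, 33): 6,
--         (29, 31): 7,
--         (27, 29): 8,
--         (26, 27): 9,
--         (23, 26): 10,
--         (20, 23): 9,
--         (18, 20): 7,
--         (15, 18): 6,
--         (11, 15): 5,
--         (7, 11): 4,
--         (0, 7): 3,
--         (-6, -0): 2,
--         (-float('inf'), -6): 1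
--     }
--
--     for (lower, upper), tsn in temperature_ranges.items():
--         if lower < temp <= upper :
--             return tsn
--
--     return None  # Return a default value if no range is matched
-- ===== SOURCE B (Python) =====
-- _THRESHOLDS = [-6, 0, 7, 11, 15, 18, 20, 23, 26, 27, 29, 31, 33, 35, 37, 39]
-- _RANKS = [1, 2, 3, 4, 5, 6, 7, 9, 10, 9, 8, 7, 6, 5, 4, 2, 0]
--
--
-- def EtToRank(temp):
--     # binary search (bisect_left) for the first upper threshold >= temp;
--     # the intervals tile the integers, so the bucket index is always valid
--     lo, hi = 0, len(_THRESHOLDS)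
--     while lo < hi:
--         mid = (lo + hi) // 2
--         if _THRESHOLDS[mid] < temp:
--             lo = mid + 1
--         else:
--             hi = mid
--     return _RANKS[lo]
-- ===== Notes on version B (the rewrite author's own statement) =====
-- stated objective: alternative
-- what changed: Replaced the linear scan over the dict of (lower,upper] interval pairs with a binary search (bisect_left) over a sorted list of the upper thresholds plus a parallel rank table.
import Mathlib
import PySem

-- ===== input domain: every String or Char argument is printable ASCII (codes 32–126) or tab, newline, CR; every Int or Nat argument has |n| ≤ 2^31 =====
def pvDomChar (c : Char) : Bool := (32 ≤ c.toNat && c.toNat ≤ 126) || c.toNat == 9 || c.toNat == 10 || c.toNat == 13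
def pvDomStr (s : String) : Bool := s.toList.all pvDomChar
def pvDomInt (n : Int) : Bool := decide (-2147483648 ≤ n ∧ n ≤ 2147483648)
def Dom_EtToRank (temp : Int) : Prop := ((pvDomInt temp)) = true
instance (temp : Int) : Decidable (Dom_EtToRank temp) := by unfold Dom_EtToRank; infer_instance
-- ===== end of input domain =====

-- One honest line: B replaces A's linear scan of the interval pairs by a binary
-- search over the sorted upper thresholds with a parallel rank table (alternative algorithm).

-- ===== PORT A =====
-- the dict of ((lower, upper), tsn); none encodes +/- infinity
def pvRanges : List ((Option Int × Option Int) × Int) :=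
  [((some 39, none), 0), ((some 37, some 39), 2), ((some 35, some 37), 4),
   ((some 33, some 35), 5), ((some 31, some 33), 6), ((some 29, some 31), 7),
   ((some 27, some 29), 8), ((some 26, some 27), 9), ((some 23, some 26), 10),
   ((some 20, some 23), 9), ((some 18, some 20), 7), ((some 15, some 18), 6),
   ((some 11, some 15), 5), ((some 7, some 11), 4), ((some 0, some 7), 3),
   ((some (-6), some 0), 2), ((none, some (-6)), 1)]

-- the for-loop over the dict items: return tsn on the first match, else None
def pvScan (temp : Int) : List ((Option Int × Option Int) × Int) → Option Int
  | [] => none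
  | ((lower, upper), tsn) :: rest =>
      if ((match lower with | none => true | some l => decide (l < temp)) &&
          (match upper with | none => true | some u => decide (temp ≤ u))) then some tsn
      else pvScan temp rest

def EtToRank (temp : Int) : Option Int := pvScan temp pvRanges

-- ===== PORT B =====
def pvThresholds : List Int := [-6, 0, 7, 11, 15, 18, 20, 23, 26, 27, 29, 31, 33, 35, 37, 39]
def pvRanksTbl : List Int := [1, 2, 3, 4, 5, 6, 7, 9, 10, 9, 8, 7, 6, 5, 4, 2, 0]

-- the while lo < hi loop, fuel-bounded (the fuel exceeds the loop's iteration bound)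
def pvBisect (temp : Int) : Nat → Nat → Nat → Nat
  | 0, lo, _ => lo
  | fuel + 1, lo, hi =>
      if lo < hi then
        let mid := (lo + hi) / 2
        if pvThresholds.getD mid 0 < temp then pvBisect temp fuel (mid + 1) hi
        else pvBisect temp fuel lo mid
      else lo

def EtToRank_alt (temp : Int) : Option Int :=
  some (pvRanksTbl.getD (pvBisect temp 16 0 pvThresholds.length) 0)

-- ===== PRECONDITION & SPEC =====
def Spec_EtToRank (temp : Int) (out : Option Int) : Prop := out = EtToRank_alt temp
instance (temp : Int) (out : Option Int) : Decidable (Spec_EtToRank temp out) := by unfold Spec_EtToRank; infer_instance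

-- ===== CLAIM (what is proved, stated in full; the proofs are below) =====
def Claim_equal_EtToRank : Prop := ∀ (temp : Int), Dom_EtToRank temp → Spec_EtToRank temp (EtToRank temp)

-- ===== LEMMAS AND PROOFS =====

-- ===== VERDICT (by name: the statement is the Claim_ definition above) =====
theorem EtToRank_spec : Claim_equal_EtToRank := by
  intro temp _
  unfold Spec_EtToRank
  by_cases c0 : temp ≤ ((-6) : Int)
  · have fA0 : ¬((39 : Int) < temp) := by omega
    have fA1 : ¬((37 : Int) < temp) := by omega
    have fA2 : ¬((35 : Int) < temp) := by omega
    have fA3 : ¬((33 : Int) < temp) := by omega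
    have fA4 : ¬((31 : Int) < temp) := by omega
    have fA5 : ¬((29 : Int) < temp) := by omega
    have fA6 : ¬((27 : Int) < temp) := by omega
    have fA7 : ¬((26 : Int) < temp) := by omega
    have fA8 : ¬((23 : Int) < temp) := by omega
    have fA9 : ¬((20 : Int) < temp) := by omega
    have fA10 : ¬((18 : Int) < temp) := by omega
    have fA11 : ¬((15 : Int) < temp) := by omega
    have fA12 : ¬((11 : Int) < temp) := by omega
    have fA13 : ¬((7 : Int) < temp) := by omega
    have fA14 : ¬((0 : Int) < temp) := by omega
    have fA15 : ¬(((-6) : Int) < temp) := by omega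
    have fU : temp ≤ ((-6) : Int) := by omega
    have fB0 : ¬((26 : Int) < temp) := by omega
    have fB1 : ¬((15 : Int) < temp) := by omega
    have fB2 : ¬((7 : Int) < temp) := by omega
    have fB3 : ¬((0 : Int) < temp) := by omega
    have fB4 : ¬(((-6) : Int) < temp) := by omega
    simp [EtToRank, EtToRank_alt, pvScan, pvRanges, pvBisect, pvThresholds, pvRanksTbl, fA0, fA1, fA2, fA3, fA4, fA5, fA6, fA7, fA8, fA9, fA10, fA11, fA12, fA13, fA14, fA15, fU]
  by_cases c1 : temp ≤ (0 : Int)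
  · have fA0 : ¬((39 : Int) < temp) := by omega
    have fA1 : ¬((37 : Int) < temp) := by omega
    have fA2 : ¬((35 : Int) < temp) := by omega
    have fA3 : ¬((33 : Int) < temp) := by omega
    have fA4 : ¬((31 : Int) < temp) := by omega
    have fA5 : ¬((29 : Int) < temp) := by omega
    have fA6 : ¬((27 : Int) < temp) := by omega
    have fA7 : ¬((26 : Int) < temp) := by omega
    have fA8 : ¬((23 : Int) < temp) := by omega
    have fA9 : ¬((20 : Int) < temp) := by omega
    have fA10 : ¬((18 : Int) < temp) := by omega
    have fA11 : ¬((15 : Int) < temp) := by omega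
    have fA12 : ¬((11 : Int) < temp) := by omega
    have fA13 : ¬((7 : Int) < temp) := by omega
    have fA14 : ¬((0 : Int) < temp) := by omega
    have fL : ((-6) : Int) < temp := by omega
    have fU : temp ≤ (0 : Int) := by omega
    have fB0 : ¬((26 : Int) < temp) := by omega
    have fB1 : ¬((15 : Int) < temp) := by omega
    have fB2 : ¬((7 : Int) < temp) := by omega
    have fB3 : ¬((0 : Int) < temp) := by omega
    have fB4 : ((-6) : Int) < temp := by omega
    simp [EtToRank, EtToRank_alt, pvScan, pvRanges, pvBisect, pvThresholds, pvRanksTbl, fA0, fA1, fA2, fA3, fA4, fA5, fA6, fA7, fA8, fA9, fA10, fA11, fA12, fA13, fA14, fL, fU, fB0, fB1, fB2, fB3, fB4]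
  by_cases c2 : temp ≤ (7 : Int)
  · have fA0 : ¬((39 : Int) < temp) := by omega
    have fA1 : ¬((37 : Int) < temp) := by omega
    have fA2 : ¬((35 : Int) < temp) := by omega
    have fA3 : ¬((33 : Int) < temp) := by omega
    have fA4 : ¬((31 : Int) < temp) := by omega
    have fA5 : ¬((29 : Int) < temp) := by omega
    have fA6 : ¬((27 : Int) < temp) := by omega
    have fA7 : ¬((26 : Int) < temp) := by omega
    have fA8 : ¬((23 : Int) < temp) := by omega
    have fA9 : ¬((20 : Int) < temp) := by omega
    have fA10 : ¬((18 : Int) < temp) := by omega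
    have fA11 : ¬((15 : Int) < temp) := by omega
    have fA12 : ¬((11 : Int) < temp) := by omega
    have fA13 : ¬((7 : Int) < temp) := by omega
    have fL : (0 : Int) < temp := by omega
    have fU : temp ≤ (7 : Int) := by omega
    have fB0 : ¬((26 : Int) < temp) := by omega
    have fB1 : ¬((15 : Int) < temp) := by omega
    have fB2 : ¬((7 : Int) < temp) := by omega
    have fB3 : (0 : Int) < temp := by omega
    simp [EtToRank, EtToRank_alt, pvScan, pvRanges, pvBisect, pvThresholds, pvRanksTbl, fA0, fA1, fA2, fA3, fA4, fA5, fA6, fA7, fA8, fA9, fA10, fA11, fA12, fA13, fL, fU, fB0, fB1, fB2, fB3]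
  by_cases c3 : temp ≤ (11 : Int)
  · have fA0 : ¬((39 : Int) < temp) := by omega
    have fA1 : ¬((37 : Int) < temp) := by omega
    have fA2 : ¬((35 : Int) < temp) := by omega
    have fA3 : ¬((33 : Int) < temp) := by omega
    have fA4 : ¬((31 : Int) < temp) := by omega
    have fA5 : ¬((29 : Int) < temp) := by omega
    have fA6 : ¬((27 : Int) < temp) := by omega
    have fA7 : ¬((26 : Int) < temp) := by omega
    have fA8 : ¬((23 : Int) < temp) := by omega
    have fA9 : ¬((20 : Int) < temp) := by omega
    have fA10 : ¬((18 : Int) < temp) := by omega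
    have fA11 : ¬((15 : Int) < temp) := by omega
    have fA12 : ¬((11 : Int) < temp) := by omega
    have fL : (7 : Int) < temp := by omega
    have fU : temp ≤ (11 : Int) := by omega
    have fB0 : ¬((26 : Int) < temp) := by omega
    have fB1 : ¬((15 : Int) < temp) := by omega
    have fB2 : (7 : Int) < temp := by omega
    have fB3 : ¬((11 : Int) < temp) := by omega
    simp [EtToRank, EtToRank_alt, pvScan, pvRanges, pvBisect, pvThresholds, pvRanksTbl, fA0, fA1, fA2, fA3, fA4, fA5, fA6, fA7, fA8, fA9, fA10, fA11, fA12, fL, fU, fB0, fB1, fB2, fB3]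
  by_cases c4 : temp ≤ (15 : Int)
  · have fA0 : ¬((39 : Int) < temp) := by omega
    have fA1 : ¬((37 : Int) < temp) := by omega
    have fA2 : ¬((35 : Int) < temp) := by omega
    have fA3 : ¬((33 : Int) < temp) := by omega
    have fA4 : ¬((31 : Int) < temp) := by omega
    have fA5 : ¬((29 : Int) < temp) := by omega
    have fA6 : ¬((27 : Int) < temp) := by omega
    have fA7 : ¬((26 : Int) < temp) := by omega
    have fA8 : ¬((23 : Int) < temp) := by omega
    have fA9 : ¬((20 : Int) < temp) := by omega
    have fA10 : ¬((18 : Int) < temp) := by omega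
    have fA11 : ¬((15 : Int) < temp) := by omega
    have fL : (11 : Int) < temp := by omega
    have fU : temp ≤ (15 : Int) := by omega
    have fB0 : ¬((26 : Int) < temp) := by omega
    have fB1 : ¬((15 : Int) < temp) := by omega
    have fB2 : (7 : Int) < temp := by omega
    have fB3 : (11 : Int) < temp := by omega
    simp [EtToRank, EtToRank_alt, pvScan, pvRanges, pvBisect, pvThresholds, pvRanksTbl, fA0, fA1, fA2, fA3, fA4, fA5, fA6, fA7, fA8, fA9, fA10, fA11, fL, fU, fB0, fB1, fB2, fB3]
  by_cases c5 : temp ≤ (18 : Int)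
  · have fA0 : ¬((39 : Int) < temp) := by omega
    have fA1 : ¬((37 : Int) < temp) := by omega
    have fA2 : ¬((35 : Int) < temp) := by omega
    have fA3 : ¬((33 : Int) < temp) := by omega
    have fA4 : ¬((31 : Int) < temp) := by omega
    have fA5 : ¬((29 : Int) < temp) := by omega
    have fA6 : ¬((27 : Int) < temp) := by omega
    have fA7 : ¬((26 : Int) < temp) := by omega
    have fA8 : ¬((23 : Int) < temp) := by omega
    have fA9 : ¬((20 : Int) < temp) := by omega
    have fA10 : ¬((18 : Int) < temp) := by omega
    have fL : (15 : Int) < temp := by omega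
    have fU : temp ≤ (18 : Int) := by omega
    have fB0 : ¬((26 : Int) < temp) := by omega
    have fB1 : (15 : Int) < temp := by omega
    have fB2 : ¬((20 : Int) < temp) := by omega
    have fB3 : ¬((18 : Int) < temp) := by omega
    simp [EtToRank, EtToRank_alt, pvScan, pvRanges, pvBisect, pvThresholds, pvRanksTbl, fA0, fA1, fA2, fA3, fA4, fA5, fA6, fA7, fA8, fA9, fA10, fL, fU, fB0, fB1, fB2, fB3]
  by_cases c6 : temp ≤ (20 : Int)
  · have fA0 : ¬((39 : Int) < temp) := by omega
    have fA1 : ¬((37 : Int) < temp) := by omega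
    have fA2 : ¬((35 : Int) < temp) := by omega
    have fA3 : ¬((33 : Int) < temp) := by omega
    have fA4 : ¬((31 : Int) < temp) := by omega
    have fA5 : ¬((29 : Int) < temp) := by omega
    have fA6 : ¬((27 : Int) < temp) := by omega
    have fA7 : ¬((26 : Int) < temp) := by omega
    have fA8 : ¬((23 : Int) < temp) := by omega
    have fA9 : ¬((20 : Int) < temp) := by omega
    have fL : (18 : Int) < temp := by omega
    have fU : temp ≤ (20 : Int) := by omega
    have fB0 : ¬((26 : Int) < temp) := by omega
    have fB1 : (15 : Int) < temp := by omega
    have fB2 : ¬((20 : Int) < temp) := by omega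
    have fB3 : (18 : Int) < temp := by omega
    simp [EtToRank, EtToRank_alt, pvScan, pvRanges, pvBisect, pvThresholds, pvRanksTbl, fA0, fA1, fA2, fA3, fA4, fA5, fA6, fA7, fA8, fA9, fL, fU, fB0, fB1, fB2, fB3]
  by_cases c7 : temp ≤ (23 : Int)
  · have fA0 : ¬((39 : Int) < temp) := by omega
    have fA1 : ¬((37 : Int) < temp) := by omega
    have fA2 : ¬((35 : Int) < temp) := by omega
    have fA3 : ¬((33 : Int) < temp) := by omega
    have fA4 : ¬((31 : Int) < temp) := by omega
    have fA5 : ¬((29 : Int) < temp) := by omega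
    have fA6 : ¬((27 : Int) < temp) := by omega
    have fA7 : ¬((26 : Int) < temp) := by omega
    have fA8 : ¬((23 : Int) < temp) := by omega
    have fL : (20 : Int) < temp := by omega
    have fU : temp ≤ (23 : Int) := by omega
    have fB0 : ¬((26 : Int) < temp) := by omega
    have fB1 : (15 : Int) < temp := by omega
    have fB2 : (20 : Int) < temp := by omega
    have fB3 : ¬((23 : Int) < temp) := by omega
    simp [EtToRank, EtToRank_alt, pvScan, pvRanges, pvBisect, pvThresholds, pvRanksTbl, fA0, fA1, fA2, fA3, fA4, fA5, fA6, fA7, fA8, fL, fU, fB0, fB1, fB2, fB3]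
  by_cases c8 : temp ≤ (26 : Int)
  · have fA0 : ¬((39 : Int) < temp) := by omega
    have fA1 : ¬((37 : Int) < temp) := by omega
    have fA2 : ¬((35 : Int) < temp) := by omega
    have fA3 : ¬((33 : Int) < temp) := by omega
    have fA4 : ¬((31 : Int) < temp) := by omega
    have fA5 : ¬((29 : Int) < temp) := by omega
    have fA6 : ¬((27 : Int) < temp) := by omega
    have fA7 : ¬((26 : Int) < temp) := by omega
    have fL : (23 : Int) < temp := by omega
    have fU : temp ≤ (26 : Int) := by omega
    have fB0 : ¬((26 : Int) < temp) := by omega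
    have fB1 : (15 : Int) < temp := by omega
    have fB2 : (20 : Int) < temp := by omega
    have fB3 : (23 : Int) < temp := by omega
    simp [EtToRank, EtToRank_alt, pvScan, pvRanges, pvBisect, pvThresholds, pvRanksTbl, fA0, fA1, fA2, fA3, fA4, fA5, fA6, fA7, fL, fU, fB0, fB1, fB2, fB3]
  by_cases c9 : temp ≤ (27 : Int)
  · have fA0 : ¬((39 : Int) < temp) := by omega
    have fA1 : ¬((37 : Int) < temp) := by omega
    have fA2 : ¬((35 : Int) < temp) := by omega
    have fA3 : ¬((33 : Int) < temp) := by omega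
    have fA4 : ¬((31 : Int) < temp) := by omega
    have fA5 : ¬((29 : Int) < temp) := by omega
    have fA6 : ¬((27 : Int) < temp) := by omega
    have fL : (26 : Int) < temp := by omega
    have fU : temp ≤ (27 : Int) := by omega
    have fB0 : (26 : Int) < temp := by omega
    have fB1 : ¬((33 : Int) < temp) := by omega
    have fB2 : ¬((29 : Int) < temp) := by omega
    have fB3 : ¬((27 : Int) < temp) := by omega
    simp [EtToRank, EtToRank_alt, pvScan, pvRanges, pvBisect, pvThresholds, pvRanksTbl, fA0, fA1, fA2, fA3, fA4, fA5, fA6, fL, fU, fB0, fB1, fB2, fB3]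
  by_cases c10 : temp ≤ (29 : Int)
  · have fA0 : ¬((39 : Int) < temp) := by omega
    have fA1 : ¬((37 : Int) < temp) := by omega
    have fA2 : ¬((35 : Int) < temp) := by omega
    have fA3 : ¬((33 : Int) < temp) := by omega
    have fA4 : ¬((31 : Int) < temp) := by omega
    have fA5 : ¬((29 : Int) < temp) := by omega
    have fL : (27 : Int) < temp := by omega
    have fU : temp ≤ (29 : Int) := by omega
    have fB0 : (26 : Int) < temp := by omega
    have fB1 : ¬((33 : Int) < temp) := by omega
    have fB2 : ¬((29 : Int) < temp) := by omega
    have fB3 : (27 : Int) < temp := by omega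
    simp [EtToRank, EtToRank_alt, pvScan, pvRanges, pvBisect, pvThresholds, pvRanksTbl, fA0, fA1, fA2, fA3, fA4, fA5, fL, fU, fB0, fB1, fB2, fB3]
  by_cases c11 : temp ≤ (31 : Int)
  · have fA0 : ¬((39 : Int) < temp) := by omega
    have fA1 : ¬((37 : Int) < temp) := by omega
    have fA2 : ¬((35 : Int) < temp) := by omega
    have fA3 : ¬((33 : Int) < temp) := by omega
    have fA4 : ¬((31 : Int) < temp) := by omega
    have fL : (29 : Int) < temp := by omega
    have fU : temp ≤ (31 : Int) := by omega
    have fB0 : (26 : Int) < temp := by omega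
    have fB1 : ¬((33 : Int) < temp) := by omega
    have fB2 : (29 : Int) < temp := by omega
    have fB3 : ¬((31 : Int) < temp) := by omega
    simp [EtToRank, EtToRank_alt, pvScan, pvRanges, pvBisect, pvThresholds, pvRanksTbl, fA0, fA1, fA2, fA3, fA4, fL, fU, fB0, fB1, fB2, fB3]
  by_cases c12 : temp ≤ (33 : Int)
  · have fA0 : ¬((39 : Int) < temp) := by omega
    have fA1 : ¬((37 : Int) < temp) := by omega
    have fA2 : ¬((35 : Int) < temp) := by omega
    have fA3 : ¬((33 : Int) < temp) := by omega
    have fL : (31 : Int) < temp := by omega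
    have fU : temp ≤ (33 : Int) := by omega
    have fB0 : (26 : Int) < temp := by omega
    have fB1 : ¬((33 : Int) < temp) := by omega
    have fB2 : (29 : Int) < temp := by omega
    have fB3 : (31 : Int) < temp := by omega
    simp [EtToRank, EtToRank_alt, pvScan, pvRanges, pvBisect, pvThresholds, pvRanksTbl, fA0, fA1, fA2, fA3, fL, fU, fB0, fB1, fB2, fB3]
  by_cases c13 : temp ≤ (35 : Int)
  · have fA0 : ¬((39 : Int) < temp) := by omega
    have fA1 : ¬((37 : Int) < temp) := by omega
    have fA2 : ¬((35 : Int) < temp) := by omega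
    have fL : (33 : Int) < temp := by omega
    have fU : temp ≤ (35 : Int) := by omega
    have fB0 : (26 : Int) < temp := by omega
    have fB1 : (33 : Int) < temp := by omega
    have fB2 : ¬((37 : Int) < temp) := by omega
    have fB3 : ¬((35 : Int) < temp) := by omega
    simp [EtToRank, EtToRank_alt, pvScan, pvRanges, pvBisect, pvThresholds, pvRanksTbl, fA0, fA1, fA2, fL, fU, fB0, fB1, fB2, fB3]
  by_cases c14 : temp ≤ (37 : Int)
  · have fA0 : ¬((39 : Int) < temp) := by omega
    have fA1 : ¬((37 : Int) < temp) := by omega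
    have fL : (35 : Int) < temp := by omega
    have fU : temp ≤ (37 : Int) := by omega
    have fB0 : (26 : Int) < temp := by omega
    have fB1 : (33 : Int) < temp := by omega
    have fB2 : ¬((37 : Int) < temp) := by omega
    have fB3 : (35 : Int) < temp := by omega
    simp [EtToRank, EtToRank_alt, pvScan, pvRanges, pvBisect, pvThresholds, pvRanksTbl, fA0, fA1, fL, fU, fB0, fB1, fB2, fB3]
  by_cases c15 : temp ≤ (39 : Int)
  · have fA0 : ¬((39 : Int) < temp) := by omega
    have fL : (37 : Int) < temp := by omega
    have fU : temp ≤ (39 : Int) := by omega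
    have fB0 : (26 : Int) < temp := by omega
    have fB1 : (33 : Int) < temp := by omega
    have fB2 : (37 : Int) < temp := by omega
    have fB3 : ¬((39 : Int) < temp) := by omega
    simp [EtToRank, EtToRank_alt, pvScan, pvRanges, pvBisect, pvThresholds, pvRanksTbl, fA0, fL, fU, fB0, fB1, fB2, fB3]
  · have fL : (39 : Int) < temp := by omega
    have fB0 : (26 : Int) < temp := by omega
    have fB1 : (33 : Int) < temp := by omega
    have fB2 : (37 : Int) < temp := by omega
    have fB3 : (39 : Int) < temp := by omega
    simp [EtToRank, EtToRank_alt, pvScan, pvRanges, pvBisect, pvThresholds, pvRanksTbl, fL, fB0, fB1, fB2, fB3]
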